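-- pv_equiv track=rewrite | github.com/Kipwisp/advent-of-code-2021 | day_22/day_22.py | reboot
-- ===== SOURCE A (Python) =====
-- def intersects(a, b):
--     if a[1] < b[0] or b[1] < a[0]:
--         return None
--
--     return max(a[0], b[0]), min(a[1], b[1])
--
-- def get_volume(cube):
--     x, y, z = cube
--     return (abs(x[1] - x[0]) + 1) * (abs(y[1] - y[0]) + 1) * (abs(z[1] - z[0]) + 1)
--
-- def reboot(puzzle, part_2=False):
--     intersections = []
--     cubes = 0
--     for command, bound in puzzle:
--         x, y, z = bound
--         if not part_2 and (x[0] < -50 or x[0] > 50):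
--             continue
--
--         subintersections = []
--         for subcommand, intersection in intersections:
--             a, b, c = intersection
--             x_i = intersects(a, x)
--             y_i = intersects(b, y)
--             z_i = intersects(c, z)
--
--             if None not in (x_i, y_i, z_i):
--                 subintersections.append((not subcommand, (x_i, y_i, z_i)))
--                 if subcommand:
--                     cubes -= get_volume((x_i, y_i, z_i))
--                 else:
--                     cubes += get_volume((x_i, y_i, z_i))
--
--         intersections.extend(subintersections)
--         if command:
--             intersections.append((command, bound))
--             cubes += get_volume(bound)
--
--     return cubes
-- ===== SOURCE B (Python) =====
-- # B: per-command recursive inclusion-exclusion -- each 'on' cuboid contributes the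
-- # volume of its part not overwritten by any LATER command; no signed record list,
-- # no running mutation (objective: alternative).
-- def _clip(c, d):
--     xs = []
--     for a, b in zip(c, d):
--         if a[1] < b[0] or b[1] < a[0]:
--             return None
--         xs.append((max(a[0], b[0]), min(a[1], b[1])))
--     return tuple(xs)
--
-- def _vol(c):
--     return (abs(c[0][1] - c[0][0]) + 1) * (abs(c[1][1] - c[1][0]) + 1) * (abs(c[2][1] - c[2][0]) + 1)
--
-- def _free(cube, laters):
--     # volume of `cube` minus the volume of its overlap with the union of `laters`
--     if not laters:
--         return _vol(cube)
--     rest = laters[1:]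
--     o = _clip(cube, laters[0])
--     if o is None:
--         return _free(cube, rest)
--     return _free(cube, rest) - _free(o, rest)
--
-- def reboot(puzzle, part_2=False):
--     kept = [(c, b) for c, b in puzzle if part_2 or -50 <= b[0][0] <= 50]
--     total = 0
--     for i, (cmd, bound) in enumerate(kept):
--         if cmd:
--             total += _free(bound, [b for _, b in kept[i + 1:]])
--     return total
-- ===== Notes on version B (the rewrite author's own statement) =====
-- stated objective: alternative
-- what changed: Replaces A's forward sweep that mutates a growing list of signed intersection records and a running total by a stateless per-command recursion: each 'on' cuboid contributes the volume of its part not covered by any later command, computed by recursive inclusion-exclusion over the suffix of later bounds.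
import Mathlib
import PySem

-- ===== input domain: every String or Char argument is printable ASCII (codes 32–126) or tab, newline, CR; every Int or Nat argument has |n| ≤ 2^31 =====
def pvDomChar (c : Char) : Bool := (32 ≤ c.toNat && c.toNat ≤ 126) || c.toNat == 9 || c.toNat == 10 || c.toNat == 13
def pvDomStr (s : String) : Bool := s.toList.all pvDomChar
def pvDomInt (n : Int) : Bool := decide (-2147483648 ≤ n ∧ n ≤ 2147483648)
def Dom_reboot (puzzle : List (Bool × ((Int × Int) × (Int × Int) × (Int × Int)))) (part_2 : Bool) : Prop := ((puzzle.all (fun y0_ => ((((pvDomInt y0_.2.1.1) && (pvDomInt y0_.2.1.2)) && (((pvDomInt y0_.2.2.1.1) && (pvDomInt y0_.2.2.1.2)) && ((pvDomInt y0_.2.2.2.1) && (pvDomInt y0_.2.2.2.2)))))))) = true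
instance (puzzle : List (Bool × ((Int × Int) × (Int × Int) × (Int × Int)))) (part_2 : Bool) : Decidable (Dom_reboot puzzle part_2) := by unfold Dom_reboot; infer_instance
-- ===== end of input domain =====

-- B replaces A's forward sweep over a growing list of signed intersection records by a
-- stateless per-command recursion: each 'on' cuboid contributes the volume of its part
-- not covered by any later command, via recursive inclusion-exclusion (objective: alternative).

abbrev PvCube : Type := (Int × Int) × (Int × Int) × (Int × Int)

-- ===== PORT A =====
def pvIntersects (a b : Int × Int) : Option (Int × Int) :=
  if a.2 < b.1 ∨ b.2 < a.1 then none
  else some (max a.1 b.1, min a.2 b.2)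

def pvGetVolume (c : PvCube) : Int :=
  (|c.1.2 - c.1.1| + 1) * (|c.2.1.2 - c.2.1.1| + 1) * (|c.2.2.2 - c.2.2.1| + 1)

-- one iteration of A's inner loop over `intersections` (state = (subintersections, cubes))
def pvStepA (bound : PvCube) (acc : List (Bool × PvCube) × Int) (e : Bool × PvCube) :
    List (Bool × PvCube) × Int :=
  let xi := pvIntersects e.2.1 bound.1
  let yi := pvIntersects e.2.2.1 bound.2.1
  let zi := pvIntersects e.2.2.2 bound.2.2
  match xi, yi, zi with
  | some xv, some yv, some zv =>
      (acc.1 ++ [(!e.1, (xv, yv, zv))],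
       if e.1 then acc.2 - pvGetVolume (xv, yv, zv) else acc.2 + pvGetVolume (xv, yv, zv))
  | _, _, _ => acc

-- one iteration of A's outer loop (state = (intersections, cubes))
def pvCmdA (part_2 : Bool) (st : List (Bool × PvCube) × Int) (cb : Bool × PvCube) :
    List (Bool × PvCube) × Int :=
  if ¬ part_2 = true ∧ (cb.2.1.1 < -50 ∨ cb.2.1.1 > 50) then st
  else
    let inner := st.1.foldl (pvStepA cb.2) ([], st.2)
    let ints := st.1 ++ inner.1
    if cb.1 then (ints ++ [(cb.1, cb.2)], inner.2 + pvGetVolume cb.2) else (ints, inner.2)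

def reboot (puzzle : List (Bool × ((Int × Int) × (Int × Int) × (Int × Int)))) (part_2 : Bool) : Int :=
  (puzzle.foldl (pvCmdA part_2) ([], 0)).2

-- ===== PORT B =====
-- _clip: per-axis clamp, None as soon as one axis fails
def pvAxisB (a b : Int × Int) : Option (Int × Int) :=
  if a.2 < b.1 ∨ b.2 < a.1 then none
  else some (max a.1 b.1, min a.2 b.2)

def pvClipB (c d : PvCube) : Option PvCube :=
  match pvAxisB c.1 d.1 with
  | none => none
  | some x =>
    match pvAxisB c.2.1 d.2.1 with
    | none => none
    | some y =>
      match pvAxisB c.2.2 d.2.2 with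
      | none => none
      | some z => some (x, y, z)

def pvVolB (c : PvCube) : Int :=
  (|c.1.2 - c.1.1| + 1) * (|c.2.1.2 - c.2.1.1| + 1) * (|c.2.2.2 - c.2.2.1| + 1)

-- _free: volume of `cube` minus the volume of its overlap with the union of `laters`
def pvFree (c : PvCube) (ls : List PvCube) : Int :=
  match ls with
  | [] => pvVolB c
  | d :: rest =>
    match pvClipB c d with
    | none => pvFree c rest
    | some o => pvFree c rest - pvFree o rest

-- B's while loop consuming `rest` with the running total
def pvTotalB : List (Bool × PvCube) → Int → Int
  | [], total => total
  | cb :: rest, total =>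
      pvTotalB rest (if cb.1 then total + pvFree cb.2 (rest.map Prod.snd) else total)

def reboot_alt (puzzle : List (Bool × ((Int × Int) × (Int × Int) × (Int × Int)))) (part_2 : Bool) : Int :=
  pvTotalB (puzzle.filter (fun cb => part_2 || decide (-50 ≤ cb.2.1.1 ∧ cb.2.1.1 ≤ 50))) 0

-- ===== PRECONDITION & SPEC =====
def Spec_reboot (puzzle : List (Bool × ((Int × Int) × (Int × Int) × (Int × Int)))) (part_2 : Bool) (out : Int) : Prop := out = reboot_alt puzzle part_2
instance (puzzle : List (Bool × ((Int × Int) × (Int × Int) × (Int × Int)))) (part_2 : Bool) (out : Int) : Decidable (Spec_reboot puzzle part_2 out) := by unfold Spec_reboot; infer_instance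

-- ===== CLAIM (what is proved, stated in full; the proofs are below) =====
def Claim_equal_reboot : Prop := ∀ (puzzle : List (Bool × ((Int × Int) × (Int × Int) × (Int × Int)))) (part_2 : Bool), Dom_reboot puzzle part_2 → Spec_reboot puzzle part_2 (reboot puzzle part_2)

-- ===== LEMMAS AND PROOFS =====

def pvSgn (b : Bool) : Int := if b then 1 else -1

-- the subintersections A's inner loop produces, as a filterMap
def pvSubs (l : List (Bool × PvCube)) (b : PvCube) : List (Bool × PvCube) :=
  l.filterMap (fun e => (pvClipB e.2 b).map (fun i => (!e.1, i)))

-- total signed volume of A's records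
def pvWSum (l : List (Bool × PvCube)) : Int :=
  (l.map (fun p => pvSgn p.1 * pvGetVolume p.2)).sum

-- the correction a new bound b contributes for an old cuboid c (free part / raw volume)
def pvPeel (c b : PvCube) (tm : List PvCube) : Int :=
  match pvClipB c b with
  | some o => pvFree o tm
  | none => 0

def pvPeelVol (c b : PvCube) : Int :=
  match pvClipB c b with
  | some o => pvGetVolume o
  | none => 0

-- net future contribution of a record list under the remaining bounds tm
def pvAdj (l : List (Bool × PvCube)) (tm : List PvCube) : Int :=
  (l.map (fun r => pvSgn r.1 * (pvFree r.2 tm - pvGetVolume r.2))).sum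

def pvP (l : List (Bool × PvCube)) (b : PvCube) (tm : List PvCube) : Int :=
  (l.map (fun r => pvSgn r.1 * pvPeel r.2 b tm)).sum

def pvV (l : List (Bool × PvCube)) (b : PvCube) : Int :=
  (l.map (fun r => pvSgn r.1 * pvPeelVol r.2 b)).sum

lemma pvVolB_eq (c : PvCube) : pvVolB c = pvGetVolume c := rfl

lemma pvFree_cons (c d : PvCube) (tm : List PvCube) :
    pvFree c (d :: tm) = pvFree c tm - pvPeel c d tm := by
  cases h : pvClipB c d <;> simp [pvFree, pvPeel, h]

lemma pvSum_map_sub (l : List (Bool × PvCube)) (f g : Bool × PvCube → Int) :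
    (l.map (fun x => f x - g x)).sum = (l.map f).sum - (l.map g).sum := by
  induction l with
  | nil => simp
  | cons a t ih => simp [ih]; ring

lemma pvAdj_nil (l : List (Bool × PvCube)) : pvAdj l [] = 0 := by
  unfold pvAdj
  have : l.map (fun r => pvSgn r.1 * (pvFree r.2 [] - pvGetVolume r.2)) = l.map (fun _ => 0) := by
    apply List.map_congr_left; intro r _; simp [pvFree, pvVolB_eq]
  simp [this]

lemma pvAdj_append (a b : List (Bool × PvCube)) (tm : List PvCube) :
    pvAdj (a ++ b) tm = pvAdj a tm + pvAdj b tm := by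
  simp [pvAdj]

lemma pvAdj_cons_bound (l : List (Bool × PvCube)) (b : PvCube) (tm : List PvCube) :
    pvAdj l (b :: tm) = pvAdj l tm - pvP l b tm := by
  unfold pvAdj pvP
  rw [show (l.map fun r => pvSgn r.1 * (pvFree r.2 (b :: tm) - pvGetVolume r.2))
      = l.map (fun r => (pvSgn r.1 * (pvFree r.2 tm - pvGetVolume r.2)) - pvSgn r.1 * pvPeel r.2 b tm) from
    List.map_congr_left (by intro r _; rw [pvFree_cons]; ring)]
  exact pvSum_map_sub l _ _

lemma pvSgn_not (b : Bool) : pvSgn (!b) = -(pvSgn b) := by cases b <;> simp [pvSgn]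

lemma pvWSum_subs (l : List (Bool × PvCube)) (b : PvCube) :
    pvWSum (pvSubs l b) = -(pvV l b) := by
  induction l with
  | nil => simp [pvSubs, pvWSum, pvV]
  | cons r t ih =>
    cases h : pvClipB r.2 b with
    | none =>
      have hs : pvSubs (r :: t) b = pvSubs t b := by simp [pvSubs, h]
      rw [hs, ih]
      simp [pvV, pvPeelVol, h]
    | some o =>
      have hs : pvSubs (r :: t) b = (!r.1, o) :: pvSubs t b := by simp [pvSubs, h]
      rw [hs]
      simp only [pvWSum, pvV, List.map_cons, List.sum_cons] at ih ⊢
      rw [ih]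
      simp [pvSgn_not, pvPeelVol, h]
      ring

lemma pvAdj_subs (l : List (Bool × PvCube)) (b : PvCube) (tm : List PvCube) :
    pvAdj (pvSubs l b) tm = -(pvP l b tm) + pvV l b := by
  induction l with
  | nil => simp [pvSubs, pvAdj, pvP, pvV]
  | cons r t ih =>
    cases h : pvClipB r.2 b with
    | none =>
      have hs : pvSubs (r :: t) b = pvSubs t b := by simp [pvSubs, h]
      rw [hs, ih]
      simp [pvP, pvV, pvPeel, pvPeelVol, h]
    | some o =>
      have hs : pvSubs (r :: t) b = (!r.1, o) :: pvSubs t b := by simp [pvSubs, h]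
      rw [hs]
      simp only [pvAdj, pvP, pvV, List.map_cons, List.sum_cons] at ih ⊢
      rw [ih]
      simp [pvSgn_not, pvPeel, pvPeelVol, h]
      ring

lemma pvStepA_eq (bound : PvCube) (acc : List (Bool × PvCube) × Int) (e : Bool × PvCube) :
    pvStepA bound acc e
      = match pvClipB e.2 bound with
        | some i => (acc.1 ++ [(!e.1, i)], acc.2 + pvSgn (!e.1) * pvGetVolume i)
        | none => acc := by
  have hax : pvAxisB = pvIntersects := rfl
  cases h1 : pvIntersects e.2.1 bound.1 <;> cases h2 : pvIntersects e.2.2.1 bound.2.1 <;>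
    cases h3 : pvIntersects e.2.2.2 bound.2.2 <;>
    simp [pvStepA, pvClipB, hax, h1, h2, h3] <;> cases he : e.1 <;> simp [pvSgn] <;> ring

lemma pvInnerA (bound : PvCube) (l : List (Bool × PvCube)) (acc : List (Bool × PvCube)) (cubes : Int) :
    l.foldl (pvStepA bound) (acc, cubes)
      = (acc ++ pvSubs l bound, cubes + pvWSum (pvSubs l bound)) := by
  induction l generalizing acc cubes with
  | nil => simp [pvSubs, pvWSum]
  | cons e t ih =>
    rw [List.foldl_cons, pvStepA_eq]
    cases hcase : pvClipB e.2 bound with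
    | none => simp only [ih]; simp [pvSubs, hcase]
    | some i =>
      simp only [ih]
      simp [pvSubs, hcase, pvWSum]
      ring

-- explicit form of one iteration of A's outer loop when the command is not skipped
lemma pvCmdA_eq (part_2 : Bool) (cb : Bool × PvCube) (l : List (Bool × PvCube)) (cubes : Int)
    (hg : ¬ (¬ part_2 = true ∧ (cb.2.1.1 < -50 ∨ cb.2.1.1 > 50))) :
    pvCmdA part_2 (l, cubes) cb
      = (l ++ pvSubs l cb.2 ++ (if cb.1 then [(cb.1, cb.2)] else []),
         cubes + pvWSum (pvSubs l cb.2) + (if cb.1 then pvGetVolume cb.2 else 0)) := by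
  rw [pvCmdA, if_neg hg]
  simp only [pvInnerA cb.2 l [] cubes, List.nil_append]
  cases hcb : cb.1 <;> simp [hcb, List.append_assoc]

lemma pvTotalB_cons (cb : Bool × PvCube) (t : List (Bool × PvCube)) (x : Int) :
    pvTotalB (cb :: t) x
      = pvTotalB t (if cb.1 then x + pvFree cb.2 (t.map Prod.snd) else x) := rfl

-- A's unguarded fold, started on any record list, computes B's remaining total
lemma pvMain (t : List (Bool × PvCube)) : ∀ (l : List (Bool × PvCube)) (c : Int),
    (t.foldl (pvCmdA true) (l, c)).2 = pvTotalB t (c + pvAdj l (t.map Prod.snd)) := by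
  induction t with
  | nil => intro l c; simp [pvTotalB, pvAdj_nil]
  | cons cb t ih =>
    intro l c
    rw [List.foldl_cons, pvCmdA_eq true cb l c (by simp), ih, pvTotalB_cons]
    congr 1
    rw [pvAdj_append, pvAdj_append, pvAdj_subs, pvWSum_subs, List.map_cons, pvAdj_cons_bound]
    have htail : pvAdj (if cb.1 then [(cb.1, cb.2)] else []) (t.map Prod.snd)
        = if cb.1 then pvFree cb.2 (t.map Prod.snd) - pvGetVolume cb.2 else 0 := by
      cases hcb : cb.1 <;> simp [pvAdj, pvSgn, hcb]
    rw [htail]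
    cases hcb : cb.1 <;> simp [hcb] <;> ring

-- skipped commands are identities: A's guarded fold equals the unguarded fold over B's kept list
lemma pvFoldA_filter (part_2 : Bool) (puzzle : List (Bool × PvCube)) :
    ∀ st, puzzle.foldl (pvCmdA part_2) st
      = (puzzle.filter (fun cb => part_2 || decide (-50 ≤ cb.2.1.1 ∧ cb.2.1.1 ≤ 50))).foldl (pvCmdA true) st := by
  induction puzzle with
  | nil => intro st; rfl
  | cons cb t ih =>
    intro st
    by_cases h : (part_2 || decide (-50 ≤ cb.2.1.1 ∧ cb.2.1.1 ≤ 50)) = true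
    · have hf : List.filter (fun cb => part_2 || decide (-50 ≤ cb.2.1.1 ∧ cb.2.1.1 ≤ 50)) (cb :: t)
          = cb :: List.filter (fun cb => part_2 || decide (-50 ≤ cb.2.1.1 ∧ cb.2.1.1 ≤ 50)) t := by
        simp only [List.filter_cons]
        rw [if_pos h]
      rw [hf, List.foldl_cons, List.foldl_cons, ih]
      congr 1
      rcases Bool.or_eq_true_iff.mp h with hp | hr
      · rw [hp]
      · have hr' := of_decide_eq_true hr
        have g1 : ¬ (¬ part_2 = true ∧ (cb.2.1.1 < -50 ∨ cb.2.1.1 > 50)) := by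
          rintro ⟨-, h2⟩; omega
        have g2 : ¬ (¬ true = true ∧ (cb.2.1.1 < -50 ∨ cb.2.1.1 > 50)) := by simp
        rw [pvCmdA, pvCmdA, if_neg g1, if_neg g2]
    · have hf : List.filter (fun cb => part_2 || decide (-50 ≤ cb.2.1.1 ∧ cb.2.1.1 ≤ 50)) (cb :: t)
          = List.filter (fun cb => part_2 || decide (-50 ≤ cb.2.1.1 ∧ cb.2.1.1 ≤ 50)) t := by
        simp only [List.filter_cons]
        rw [if_neg h]
      rw [hf, List.foldl_cons, ← ih]
      congr 1
      simp only [Bool.or_eq_true_iff, decide_eq_true_eq, not_or] at h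
      have g : ¬ part_2 = true ∧ (cb.2.1.1 < -50 ∨ cb.2.1.1 > 50) := by
        constructor
        · simp [h.1]
        · omega
      rw [pvCmdA, if_pos g]

-- ===== VERDICT (by name: the statement is the Claim_ definition above) =====
theorem reboot_spec : Claim_equal_reboot := by
  intro puzzle part_2 _
  unfold Spec_reboot reboot reboot_alt
  rw [pvFoldA_filter part_2 puzzle ([], 0), pvMain]
  simp [pvAdj]
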